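-- pv_equiv track=rewrite | github.com/tcameronwaller/bimodality | bimodality/utility.py | count_entities_with_references
-- ===== SOURCE A (Python) =====
-- def count_entities_with_references(references=None, entities=None):
--     """
--     Counts entities with any of specific references.
--
--     arguments:
--         references (list<str>): identifiers of references
--         entities (dict<dict>): information about entities
--
--     returns:
--         (int): count of entities with specific reference
--
--     raises:
--
--     """
--
--     count = 0
--     for entity in entities.values():
--         matches = []
--         for reference in references:
--             if reference in entity["references"].keys():
--                 if len(entity["references"][reference]) > 0:
--                     matches.append(True)
--         if any(matches):
--             count += 1
--     return count
-- ===== SOURCE B (Python) =====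
-- def count_entities_with_references(references=None, entities=None):
--     # Entity-major single pass: scan each entity's OWN references dict and test
--     # its keys against a hash set of the wanted references (no lookup per reference),
--     # counting via sum over a generator.
--     if not references:
--         return 0
--     wanted = set(references)
--     return sum(
--         1
--         for entity in entities.values()
--         if any(key in wanted and len(values) > 0
--                for key, values in entity["references"].items())
--     )
-- ===== Notes on version B (the rewrite author's own statement) =====
-- stated objective: alternative
-- what changed: Instead of scanning the references list per entity with a dict membership/lookup per reference and collecting a boolean match list, B builds a hash set of the wanted references once and, per entity, scans the entity's own references dict items testing keys against that set, counting with sum over a generator.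
import Mathlib
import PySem

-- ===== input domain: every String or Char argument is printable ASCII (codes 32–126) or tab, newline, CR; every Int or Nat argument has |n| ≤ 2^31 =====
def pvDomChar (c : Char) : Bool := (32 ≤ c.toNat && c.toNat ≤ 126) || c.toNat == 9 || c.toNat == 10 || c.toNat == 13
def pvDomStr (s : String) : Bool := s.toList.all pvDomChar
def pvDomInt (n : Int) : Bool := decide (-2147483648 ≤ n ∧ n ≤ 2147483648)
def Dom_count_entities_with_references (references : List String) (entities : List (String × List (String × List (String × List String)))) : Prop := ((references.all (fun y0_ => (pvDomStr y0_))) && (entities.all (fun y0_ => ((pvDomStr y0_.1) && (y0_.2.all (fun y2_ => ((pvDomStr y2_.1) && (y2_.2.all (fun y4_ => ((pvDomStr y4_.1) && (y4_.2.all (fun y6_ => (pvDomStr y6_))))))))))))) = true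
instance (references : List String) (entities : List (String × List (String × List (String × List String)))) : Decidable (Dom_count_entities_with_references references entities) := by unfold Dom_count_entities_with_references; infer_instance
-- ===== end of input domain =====

-- B scans each entity's own references dict against a hash set of the wanted references (sum over a generator), instead of scanning the references list with dict lookups per reference; alternative decomposition, same order of cost.


-- ===== PORT A =====
-- `entity["references"]` is ported as a total getD; Pre_ excludes exactly the inputs where Python raises KeyError.
-- The per-entity `matches` list is built by the inner fold and then tested with `any(matches)`.
def count_entities_with_references (references : List String) (entities : List (String × List (String × List (String × List String)))) : Int :=
  (PySem.Dict.ofList entities).values.foldl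
    (fun count entity =>
      if (references.foldl
          (fun ms reference =>
            if (PySem.Dict.ofList ((PySem.Dict.ofList entity).getD "references" [])).contains reference then
              if PySem.List.len ((PySem.Dict.ofList ((PySem.Dict.ofList entity).getD "references" [])).getD reference []) > 0 then ms ++ [true] else ms
            else ms) ([] : List Bool)).any id
      then count + 1 else count) 0

-- ===== PORT B =====
-- early return 0 when references is empty; otherwise a set `wanted` of references, then
-- sum(1 for entity in values if any(key in wanted and len(values)>0 for key, values in entity["references"].items()))
def count_entities_with_references_alt (references : List String) (entities : List (String × List (String × List (String × List String)))) : Int :=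
  if references = [] then 0
  else
    let wanted := PySem.Set.ofList references
    (PySem.Dict.ofList entities).values.foldl
      (fun acc entity =>
        if (PySem.Dict.ofList ((PySem.Dict.ofList entity).getD "references" [])).items.any
            (fun kv => PySem.Set.contains wanted kv.1 && decide (PySem.List.len kv.2 > 0))
        then acc + 1 else acc) 0

-- ===== PRECONDITION & SPEC =====
-- Pre_ excludes exactly the inputs on which Python A raises KeyError: a non-empty
-- references list together with some entity that lacks the "references" key.
def Pre_count_entities_with_references (references : List String) (entities : List (String × List (String × List (String × List String)))) : Prop :=
  references = [] ∨ ∀ e ∈ (PySem.Dict.ofList entities).values, (PySem.Dict.ofList e).contains "references" = true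
instance (references : List String) (entities : List (String × List (String × List (String × List String)))) : Decidable (Pre_count_entities_with_references references entities) := by unfold Pre_count_entities_with_references; infer_instance

def pvWitness_count_entities_with_references : List String × (List (String × List (String × List (String × List String)))) :=
  (["a", "b"], [("e1", [("references", [("a", ["x"])])]), ("e2", [("references", [("c", [])])])])

def Spec_count_entities_with_references (references : List String) (entities : List (String × List (String × List (String × List String)))) (out : Int) : Prop := out = count_entities_with_references_alt references entities
instance (references : List String) (entities : List (String × List (String × List (String × List String)))) (out : Int) : Decidable (Spec_count_entities_with_references references entities out) := by unfold Spec_count_entities_with_references; infer_instance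

-- ===== CLAIM (what is proved, stated in full; the proofs are below) =====
def Claim_equal_count_entities_with_references : Prop := ∀ (references : List String) (entities : List (String × List (String × List (String × List String)))), Dom_count_entities_with_references references entities → Pre_count_entities_with_references references entities → Spec_count_entities_with_references references entities (count_entities_with_references references entities)

-- ===== LEMMAS AND PROOFS =====

-- A's per-(reference, entity) test
def pvCond (reference : String) (entity : List (String × List (String × List String))) : Bool :=
  (PySem.Dict.ofList ((PySem.Dict.ofList entity).getD "references" [])).contains reference
    && decide (PySem.List.len ((PySem.Dict.ofList ((PySem.Dict.ofList entity).getD "references" [])).getD reference []) > 0)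

def pvGood (references : List String) (entity : List (String × List (String × List String))) : Bool :=
  references.any (fun r => pvCond r entity)

-- B's per-entity test
def pvGoodB (references : List String) (entity : List (String × List (String × List String))) : Bool :=
  (PySem.Dict.ofList ((PySem.Dict.ofList entity).getD "references" [])).items.any
    (fun kv => PySem.Set.contains (PySem.Set.ofList references) kv.1 && decide (PySem.List.len kv.2 > 0))

-- A's inner loop: `any(matches)` is `any` of the per-reference condition
theorem pvA_matches (entity : List (String × List (String × List String))) (refsL : List String) (ms : List Bool) :
    (refsL.foldl
      (fun ms reference =>
        if (PySem.Dict.ofList ((PySem.Dict.ofList entity).getD "references" [])).contains reference then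
          if PySem.List.len ((PySem.Dict.ofList ((PySem.Dict.ofList entity).getD "references" [])).getD reference []) > 0 then ms ++ [true] else ms
        else ms) ms).any id = (ms.any id || refsL.any (fun r => pvCond r entity)) := by
  induction refsL generalizing ms with
  | nil => simp
  | cons r rs ih =>
    simp only [List.foldl_cons, List.any_cons]
    by_cases h1 : (PySem.Dict.ofList ((PySem.Dict.ofList entity).getD "references" [])).contains r = true
    · by_cases h2 : PySem.List.len ((PySem.Dict.ofList ((PySem.Dict.ofList entity).getD "references" [])).getD r []) > 0
      · rw [if_pos h1, if_pos h2, ih]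
        have h2' : 0 < ((PySem.Dict.ofList ((PySem.Dict.ofList entity).getD "references" [])).getD r []).length := by
          simpa [PySem.List.len_eq] using h2
        simp [pvCond, h1, h2']
      · rw [if_pos h1, if_neg h2, ih]
        have h2' : ¬ 0 < ((PySem.Dict.ofList ((PySem.Dict.ofList entity).getD "references" [])).getD r []).length := by
          simpa [PySem.List.len_eq] using h2
        simp [pvCond, h2']
    · simp only [Bool.not_eq_true] at h1
      rw [h1, if_neg (by simp), ih]
      simp [pvCond, h1]

-- A's outer loop is a countP over entity values
theorem pvA_count (refsL : List String) (vs : List (List (String × List (String × List String)))) (c : Int) :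
    (vs.foldl
      (fun count entity =>
        if (refsL.foldl
            (fun ms reference =>
              if (PySem.Dict.ofList ((PySem.Dict.ofList entity).getD "references" [])).contains reference then
                if PySem.List.len ((PySem.Dict.ofList ((PySem.Dict.ofList entity).getD "references" [])).getD reference []) > 0 then ms ++ [true] else ms
              else ms) ([] : List Bool)).any id
        then count + 1 else count) c) = c + vs.countP (pvGood refsL) := by
  induction vs generalizing c with
  | nil => simp
  | cons v vs ih =>
    simp only [List.foldl_cons]
    rw [pvA_matches v refsL []]
    by_cases h : pvGood refsL v = true
    · rw [List.countP_cons_of_pos h]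
      simp only [pvGood] at h
      rw [if_pos (by simp [h]), ih]
      push_cast; ring
    · rw [List.countP_cons_of_neg h]
      simp only [pvGood, Bool.not_eq_true] at h
      rw [if_neg (by simp [h]), ih]

-- B's outer loop is a countP over entity values
theorem pvB_count (refsL : List String) (vs : List (List (String × List (String × List String)))) (c : Int) :
    (vs.foldl
      (fun acc entity =>
        if (PySem.Dict.ofList ((PySem.Dict.ofList entity).getD "references" [])).items.any
            (fun kv => PySem.Set.contains (PySem.Set.ofList refsL) kv.1 && decide (PySem.List.len kv.2 > 0))
        then acc + 1 else acc) c) = c + vs.countP (pvGoodB refsL) := by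
  induction vs generalizing c with
  | nil => simp
  | cons v vs ih =>
    simp only [List.foldl_cons]
    by_cases h : pvGoodB refsL v = true
    · rw [List.countP_cons_of_pos h]
      simp only [pvGoodB] at h
      rw [if_pos h, ih]
      push_cast; ring
    · rw [List.countP_cons_of_neg h]
      simp only [pvGoodB, Bool.not_eq_true] at h
      rw [if_neg (by rw [h]; simp), ih]

-- the per-entity tests agree: scanning references with dict lookups equals scanning
-- the entity's dict items against the set of references (keys of a Dict are unique)
theorem pvGood_eq_pvGoodB (refsL : List String) (entity : List (String × List (String × List String))) :
    pvGood refsL entity = pvGoodB refsL entity := by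
  set d := PySem.Dict.ofList ((PySem.Dict.ofList entity).getD "references" []) with hd
  have hnd : d.keys.Nodup := PySem.Dict.nodup_keys_ofList _
  apply Bool.eq_iff_iff.mpr
  simp only [pvGood, pvGoodB, List.any_eq_true, pvCond, Bool.and_eq_true, decide_eq_true_eq,
    PySem.Set.contains_iff, PySem.Set.mem_ofList, ← hd]
  constructor
  · rintro ⟨r, hr, hc, hlen⟩
    have hk : r ∈ d.keys := (PySem.Dict.contains_iff_mem_keys d r).mp hc
    obtain ⟨v, hv⟩ : ∃ v, (r, v) ∈ d.items := by simpa [PySem.Dict.keys] using hk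
    refine ⟨(r, v), hv, hr, ?_⟩
    have hg : d.getD r [] = v := PySem.Dict.getD_of_mem_items d hv hnd []
    exact hg ▸ hlen
  · rintro ⟨⟨k, v⟩, hkv, hr, hlen⟩
    refine ⟨k, hr, ?_, ?_⟩
    · exact (PySem.Dict.contains_iff_mem_keys d k).mpr
        (by simpa [PySem.Dict.keys] using List.mem_map_of_mem (f := Prod.fst) hkv)
    · rw [PySem.Dict.getD_of_mem_items d hkv hnd []]; exact hlen

-- ===== VERDICT (by name: the statement is the Claim_ definition above) =====
theorem count_entities_with_references_spec : Claim_equal_count_entities_with_references := by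
  intro references entities _ _
  unfold Spec_count_entities_with_references
  unfold count_entities_with_references count_entities_with_references_alt
  rw [pvA_count]
  by_cases hnil : references = []
  · subst hnil
    simp [pvGood, List.countP_eq_zero]
  · rw [if_neg hnil, pvB_count]
    have h : pvGood references = pvGoodB references :=
      funext (pvGood_eq_pvGoodB references)
    rw [h]
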